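-- pv_equiv track=rewrite | github.com/AP-MI-2021/lab-4-teoherman18 | main.py | alta_lista
-- ===== SOURCE A (Python) =====
-- def numar_divizori(n):
--     div = 0
--     contor = 2
--     while contor < n:
--         if n%contor == 0:
--             div = div +1
--         contor = contor +1
--     return div
--
-- def alta_lista(lista1):
--     """
--     Afișarea listei obținute din lista inițială în care numerele care apar doar o singură dată sunt
--     nlocuite cu numărul de divizori proprii ai numărului.
--     :param lista1: lista nr intregi
--     :return: rezultat
--     """
--     lista2 = []
--     for i in range(len(lista1)):
--         ok = 1
--         for j in range(len(lista1)):
--             if lista1[i] == lista1[j] and i != j: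
--                 ok = 0
--         if ok == 1:
--             lista2.append(numar_divizori(lista1[i]))
--         else:
--             lista2.append(lista1[i])
--     return lista2
-- ===== SOURCE B (Python) =====
-- def numar_divizori_proprii_rapid(n):
--     # proper divisors in [2, n): trial division up to sqrt(n), pairing d with n//d
--     if n < 3:
--         return 0
--     cnt = 0
--     i = 2
--     while i * i <= n:
--         if n % i == 0:
--             cnt += 1 if i * i == n else 2
--         i += 1
--     return cnt
--
-- def alta_lista(lista1):
--     freq = {}
--     for x in lista1:
--         freq[x] = freq.get(x, 0) + 1
--     return [numar_divizori_proprii_rapid(x) if freq[x] == 1 else x for x in lista1]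
-- ===== Notes on version B (the rewrite author's own statement) =====
-- stated objective: faster
-- what changed: Uniqueness is decided by a frequency dictionary built in one pass instead of a nested index scan, and proper divisors are counted by trial division up to sqrt(n) with divisor pairing instead of scanning all of [2, n).
import Mathlib
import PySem

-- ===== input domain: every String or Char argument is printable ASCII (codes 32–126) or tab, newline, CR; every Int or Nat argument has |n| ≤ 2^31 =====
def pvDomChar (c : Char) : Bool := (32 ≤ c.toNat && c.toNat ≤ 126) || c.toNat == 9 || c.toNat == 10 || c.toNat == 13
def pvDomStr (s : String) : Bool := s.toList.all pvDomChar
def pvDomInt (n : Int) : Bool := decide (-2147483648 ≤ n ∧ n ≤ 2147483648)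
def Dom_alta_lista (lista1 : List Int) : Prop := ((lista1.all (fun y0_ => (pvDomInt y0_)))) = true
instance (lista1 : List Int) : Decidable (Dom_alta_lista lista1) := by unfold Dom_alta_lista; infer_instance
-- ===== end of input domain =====

-- B replaces A's quadratic duplicate scan by a one-pass frequency dictionary and counts
-- proper divisors by trial division up to sqrt(n) with divisor pairing (objective: faster).


-- ===== PORT A =====
-- 'while contor < n' loop of numar_divizori; fuel (n-2).toNat is exactly the iteration count
def numarDivizoriGo (n : Int) : Nat → Int → Int → Int
  | 0, div, _ => div
  | fuel+1, div, contor =>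
    if contor < n then
      numarDivizoriGo n fuel (if PySem.Int.mod n contor = 0 then div + 1 else div) (contor + 1)
    else div

def numar_divizori (n : Int) : Int := numarDivizoriGo n (n - 2).toNat 0 2

def alta_lista (lista1 : List Int) : List Int :=
  (List.range lista1.length).foldl (fun lista2 i =>
    let ok : Int := (List.range lista1.length).foldl (fun ok j =>
      if lista1.getD i 0 = lista1.getD j 0 ∧ i ≠ j then 0 else ok) 1
    if ok = 1 then lista2 ++ [numar_divizori (lista1.getD i 0)]
    else lista2 ++ [lista1.getD i 0]) []

-- ===== PORT B =====
-- 'while i * i <= n' loop of numar_divizori_proprii_rapid; fuel n.toNat is enough (i stops by sqrt n + 1)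
def rapidGo (n : Int) : Nat → Int → Int → Int
  | 0, cnt, _ => cnt
  | fuel+1, cnt, i =>
    if i * i ≤ n then
      rapidGo n fuel (if PySem.Int.mod n i = 0 then (if i * i = n then cnt + 1 else cnt + 2) else cnt) (i + 1)
    else cnt

def numar_divizori_proprii_rapid (n : Int) : Int :=
  if n < 3 then 0 else rapidGo n n.toNat 0 2

def alta_lista_alt (lista1 : List Int) : List Int :=
  let freq := lista1.foldl (fun d x => d.insert x (d.getD x 0 + 1)) (PySem.Dict.empty : PySem.Dict Int Int)
  lista1.map (fun x => if freq.getD x 0 = 1 then numar_divizori_proprii_rapid x else x)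

-- ===== PRECONDITION & SPEC =====
def Spec_alta_lista (lista1 : List Int) (out : List Int) : Prop := out = alta_lista_alt lista1
instance (lista1 : List Int) (out : List Int) : Decidable (Spec_alta_lista lista1 out) := by unfold Spec_alta_lista; infer_instance

-- ===== CLAIM (what is proved, stated in full; the proofs are below) =====
def Claim_equal_alta_lista : Prop := ∀ (lista1 : List Int), Dom_alta_lista lista1 → Spec_alta_lista lista1 (alta_lista lista1)

-- ===== LEMMAS AND PROOFS =====

-- A's divisor loop counts the divisors of n in [contor, n)
theorem numarDivizoriGo_eq (n : Int) : ∀ (fuel : Nat) (c div : Int), 0 < c → n ≤ c + fuel →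
    numarDivizoriGo n fuel div c =
      div + ((Finset.Ico c.toNat n.toNat).filter (fun k : Nat => (k : Int) ∣ n)).card := by
  intro fuel
  induction fuel with
  | zero =>
    intro c div hc hf
    have : n.toNat ≤ c.toNat := by omega
    rw [numarDivizoriGo]
    rw [Finset.Ico_eq_empty (by omega)]
    simp
  | succ f ih =>
    intro c div hc hf
    rw [numarDivizoriGo]
    by_cases h : c < n
    · simp only [if_pos h]
      rw [ih (c+1) _ (by omega) (by omega)]
      have hcc : c.toNat < n.toNat := by omega
      have hcast : ((c.toNat : Int)) = c := by omega
      have hins : Finset.Ico c.toNat n.toNat = insert c.toNat (Finset.Ico (c.toNat + 1) n.toNat) :=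
        (Finset.insert_Ico_add_one_left_eq_Ico hcc).symm
      have hnot : c.toNat ∉ Finset.Ico (c.toNat + 1) n.toNat := by simp
      have h1 : (c + 1).toNat = c.toNat + 1 := by omega
      rw [h1, hins, Finset.filter_insert]
      by_cases hd : (c.toNat : Int) ∣ n
      · rw [if_pos hd, Finset.card_insert_of_notMem (by simp)]
        have : PySem.Int.mod n c = 0 := by
          rw [PySem.Int.mod_eq_zero_iff_dvd]; rwa [hcast] at hd
        rw [if_pos this]; push_cast; ring
      · rw [if_neg hd]
        have : ¬ PySem.Int.mod n c = 0 := by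
          rw [PySem.Int.mod_eq_zero_iff_dvd, ← hcast]; exact hd
        rw [if_neg this]
    · simp only [if_neg h]
      rw [Finset.Ico_eq_empty (by omega)]
      simp

theorem numar_divizori_eq (n : Int) :
    numar_divizori n = ((Finset.Ico 2 n.toNat).filter (fun k : Nat => (k : Int) ∣ n)).card := by
  unfold numar_divizori
  rw [numarDivizoriGo_eq n _ 2 0 (by omega) (by omega)]
  rw [show (2 : Int).toNat = 2 from rfl]
  norm_num

-- B's divisor loop sums the paired contributions for i in [c, sqrt n]
theorem rapidGo_eq (n : Int) (hn : 3 ≤ n) : ∀ (fuel : Nat) (c cnt : Int), 2 ≤ c → n ≤ c + fuel →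
    rapidGo n fuel cnt c =
      cnt + ∑ i ∈ Finset.Ico c.toNat (Nat.sqrt n.toNat + 1),
        (if (i : Int) ∣ n then (if i * i = n.toNat then (1 : Int) else 2) else 0) := by
  have hm : 3 ≤ n.toNat := by omega
  have hs : Nat.sqrt n.toNat < n.toNat := Nat.sqrt_lt_self (by omega)
  intro fuel
  induction fuel with
  | zero =>
    intro c cnt hc hf
    rw [rapidGo, Finset.Ico_eq_empty (by simp; omega)]
    simp
  | succ f ih =>
    intro c cnt hc hf
    rw [rapidGo]
    have hcast : ((c.toNat : Int)) = c := by omega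
    by_cases h : c * c ≤ n
    · simp only [if_pos h]
      have hcle : c ≤ n := by nlinarith
      have hcc : c.toNat * c.toNat ≤ n.toNat := by
        have : ((c.toNat * c.toNat : Nat) : Int) ≤ ((n.toNat : Nat) : Int) := by push_cast; rw [hcast]; omega
        exact_mod_cast this
      have hsqrt : c.toNat ≤ Nat.sqrt n.toNat := Nat.le_sqrt.mpr hcc
      rw [ih (c+1) _ (by omega) (by omega)]
      have h1 : (c + 1).toNat = c.toNat + 1 := by omega
      have hins : Finset.Ico c.toNat (Nat.sqrt n.toNat + 1)
          = insert c.toNat (Finset.Ico (c.toNat + 1) (Nat.sqrt n.toNat + 1)) :=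
        (Finset.insert_Ico_add_one_left_eq_Ico (by omega)).symm
      rw [h1, hins, Finset.sum_insert (by simp)]
      have hsq : ((c.toNat * c.toNat : Nat) : Int) = c * c := by push_cast; rw [hcast]
      have hsqiff : (c.toNat * c.toNat = n.toNat) ↔ c * c = n := by
        constructor
        · intro he; rw [← hsq, he]; omega
        · intro he; have : ((c.toNat * c.toNat : Nat) : Int) = ((n.toNat : Nat) : Int) := by
            rw [hsq]; omega
          exact_mod_cast this
      by_cases hd : (c.toNat : Int) ∣ n
      · have hmod : PySem.Int.mod n c = 0 := by rw [PySem.Int.mod_eq_zero_iff_dvd]; rwa [hcast] at hd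
        rw [if_pos hmod, if_pos hd]
        by_cases he : c * c = n
        · rw [if_pos he, if_pos (hsqiff.mpr he)]; ring
        · rw [if_neg he, if_neg (fun hx => he (hsqiff.mp hx))]; ring
      · have hmod : ¬ PySem.Int.mod n c = 0 := by rw [PySem.Int.mod_eq_zero_iff_dvd, ← hcast]; exact hd
        rw [if_neg hmod, if_neg hd]; ring
    · simp only [if_neg h]
      have : n.toNat < c.toNat * c.toNat := by
        have h2 : n < c * c := by omega
        have : ((n.toNat : Nat) : Int) < ((c.toNat * c.toNat : Nat) : Int) := by push_cast; rw [hcast]; omega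
        exact_mod_cast this
      rw [Finset.Ico_eq_empty (by have h3 := Nat.sqrt_lt.mpr this; omega)]
      simp

-- the pairing d ↦ m / d : divisors of m in [2, m) counted via divisors up to sqrt m
theorem card_proper_divisors_sqrt (m : ℕ) (hm : 3 ≤ m) :
    ((Finset.Ico 2 m).filter (fun k => k ∣ m)).card =
      ∑ i ∈ Finset.Ico 2 (Nat.sqrt m + 1), (if i ∣ m then (if i * i = m then 1 else 2) else 0) := by
  set s := Nat.sqrt m with hsdef
  have hsm : s < m := Nat.sqrt_lt_self (by omega)
  have hs1 : 1 ≤ s := by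
    have : 1 * 1 ≤ m := by omega
    exact Nat.le_sqrt.mpr this
  have hspec1 : s * s ≤ m := Nat.sqrt_le m
  have hspec2 : m < (s + 1) * (s + 1) := Nat.lt_succ_sqrt m
  -- split the divisor set at s
  have hsplit :
      (((Finset.Ico 2 m).filter (fun k => k ∣ m)).filter (fun d => d ≤ s)).card +
      (((Finset.Ico 2 m).filter (fun k => k ∣ m)).filter (fun d => ¬ d ≤ s)).card =
      ((Finset.Ico 2 m).filter (fun k => k ∣ m)).card :=
    Finset.card_filter_add_card_filter_not _
  have hlo : ((Finset.Ico 2 m).filter (fun k => k ∣ m)).filter (fun d => d ≤ s)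
      = (Finset.Ico 2 (s + 1)).filter (fun i => i ∣ m) := by
    ext a
    simp only [Finset.mem_filter, Finset.mem_Ico]
    constructor
    · rintro ⟨⟨⟨h2, _⟩, hd⟩, hle⟩; exact ⟨⟨h2, by omega⟩, hd⟩
    · rintro ⟨⟨h2, hlt⟩, hd⟩; exact ⟨⟨⟨h2, by omega⟩, hd⟩, by omega⟩
  have hhi : (((Finset.Ico 2 m).filter (fun k => k ∣ m)).filter (fun d => ¬ d ≤ s)).card
      = ((Finset.Ico 2 (s + 1)).filter (fun i => i ∣ m ∧ ¬ i * i = m)).card := by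
    apply Finset.card_bij' (fun d _ => m / d) (fun i _ => m / i)
    · -- forward membership
      intro d hd
      simp only [Finset.mem_filter, Finset.mem_Ico] at hd
      obtain ⟨⟨⟨h2, hlt⟩, hdvd⟩, hgt⟩ := hd
      have hmul : m / d * d = m := Nat.div_mul_cancel hdvd
      set q := m / d with hq
      have hq2 : 2 ≤ q := by
        rcases Nat.lt_or_ge q 2 with h | h
        · have : q * d ≤ 1 * d := Nat.mul_le_mul_right d (by omega)
          omega
        · exact h
      have hqs : q ≤ s := by
        by_contra hqs
        have : (s + 1) * (s + 1) ≤ q * d := Nat.mul_le_mul (by omega) (by omega)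
        omega
      have hne : ¬ q * q = m := by
        intro he
        have habc : q * q = d * q := by rw [he, ← hmul]; ring
        have : q = d := Nat.eq_of_mul_eq_mul_right (show 0 < q by omega) habc
        omega
      simp only [Finset.mem_filter, Finset.mem_Ico]
      exact ⟨⟨hq2, by omega⟩, Dvd.intro_left d (by rw [← hmul]; ring), hne⟩
    · -- backward membership
      intro i hi
      simp only [Finset.mem_filter, Finset.mem_Ico] at hi
      obtain ⟨⟨h2, hlt⟩, hdvd, hne⟩ := hi
      have hmul : m / i * i = m := Nat.div_mul_cancel hdvd
      set d := m / i with hd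
      have hmi : d * i = m := hmul
      have hd1 : 1 ≤ d := by
        rcases Nat.eq_zero_or_pos d with h | h
        · rw [h] at hmi; simp at hmi; omega
        · exact h
      have hds : s < d := by
        by_contra hds
        have h4 : d * i ≤ s * i := Nat.mul_le_mul_right i (by omega)
        have h5 : d * i ≤ s * s := Nat.mul_le_mul (by omega) (by omega)
        have hmss : m = s * s := by omega
        have h6 : s ≤ i := by
          have h7 : s * s ≤ s * i := by omega
          exact Nat.le_of_mul_le_mul_left h7 (by omega)
        have his : i = s := by omega
        apply hne
        rw [his]; omega
      have hdm : d < m := by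
        have h8 : 2 * d ≤ i * d := Nat.mul_le_mul_right d h2
        have h9 : i * d = m := by rw [← hmul]; ring
        omega
      simp only [Finset.mem_filter, Finset.mem_Ico]
      exact ⟨⟨⟨by omega, hdm⟩, Dvd.intro_left i (by rw [← hmul]; ring)⟩, by omega⟩
    · intro d hd
      simp only [Finset.mem_filter, Finset.mem_Ico] at hd
      exact Nat.div_div_self hd.1.2 (by omega)
    · intro i hi
      simp only [Finset.mem_filter, Finset.mem_Ico] at hi
      exact Nat.div_div_self hi.2.1 (by omega)
  -- assemble the sums
  have hsum : ∑ i ∈ Finset.Ico 2 (s + 1), (if i ∣ m then (if i * i = m then 1 else 2) else 0)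
      = ∑ i ∈ Finset.Ico 2 (s + 1), ((if i ∣ m then 1 else 0) + (if i ∣ m ∧ ¬ i * i = m then 1 else 0)) := by
    apply Finset.sum_congr rfl
    intro i _
    by_cases h1 : i ∣ m <;> by_cases h2 : i * i = m <;> simp [h1, h2]
  rw [hsum, Finset.sum_add_distrib, ← Finset.card_filter, ← Finset.card_filter, ← hsplit, hlo, hhi]

theorem numar_divizori_agree (n : Int) : numar_divizori n = numar_divizori_proprii_rapid n := by
  by_cases h : n < 3
  · unfold numar_divizori numar_divizori_proprii_rapid
    rw [if_pos h]
    have h0 : (n - 2).toNat = 0 := by omega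
    rw [h0, numarDivizoriGo]
  · unfold numar_divizori_proprii_rapid
    rw [if_neg h]
    rw [numar_divizori_eq, rapidGo_eq n (by omega) n.toNat 2 0 (by omega) (by omega), zero_add]
    rw [show (2 : Int).toNat = 2 from rfl]
    have hn' : n = ((n.toNat : Nat) : Int) := by omega
    have hdvd : ∀ i : ℕ, ((i : Int) ∣ n) ↔ i ∣ n.toNat := by
      intro i
      constructor
      · intro hd; rw [hn'] at hd; exact_mod_cast hd
      · intro hd; rw [hn']; exact_mod_cast hd
    have hset : (Finset.Ico 2 n.toNat).filter (fun k : Nat => (k : Int) ∣ n)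
        = (Finset.Ico 2 n.toNat).filter (fun k => k ∣ n.toNat) := by
      ext a; simp [hdvd]
    rw [hset, card_proper_divisors_sqrt n.toNat (by omega), Nat.cast_sum]
    apply Finset.sum_congr rfl
    intro i _
    by_cases h1 : i ∣ n.toNat
    · rw [if_pos h1, if_pos ((hdvd i).mpr h1)]
      by_cases h2 : i * i = n.toNat
      · rw [if_pos h2, if_pos h2]; norm_num
      · rw [if_neg h2, if_neg h2]; norm_num
    · rw [if_neg h1, if_neg (fun hx => h1 ((hdvd i).mp hx))]; norm_num

-- the ok-flag inner loop is an existence test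
theorem foldl_flag (p : Nat → Prop) [DecidablePred p] (xs : List Nat) (a : Int) :
    xs.foldl (fun ok j => if p j then 0 else ok) a = if ∃ j ∈ xs, p j then 0 else a := by
  induction xs generalizing a with
  | nil => simp
  | cons x xs ih =>
    simp only [List.foldl_cons]
    rw [ih]
    by_cases hx : p x <;> by_cases hex : ∃ j ∈ xs, p j <;> simp [hx, hex]

theorem countP_split (p q : Nat → Bool) (l : List ℕ) :
    l.countP p = l.countP (fun a => p a && q a) + l.countP (fun a => p a && !q a) := by
  induction l with
  | nil => simp
  | cons x t ih =>
    by_cases h1 : p x <;> by_cases h2 : q x <;>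
      simp [h1, h2, ih] <;> omega

theorem countP_range_getD (l : List Int) (v : Int) :
    (List.range l.length).countP (fun j => l.getD j 0 == v) = l.count v := by
  induction l with
  | nil => simp
  | cons a t ih =>
    rw [List.length_cons, List.range_succ_eq_map, List.countP_cons, List.countP_map]
    simp only [Function.comp_def, List.getD_cons_succ, List.getD_cons_zero]
    rw [ih, List.count_cons]

theorem map_range_getD (l : List Int) (g : Int → Int) :
    (List.range l.length).map (fun i => g (l.getD i 0)) = l.map g := by
  apply List.ext_getElem
  · simp
  · intro i h1 h2
    simp only [List.getElem_map, List.getElem_range]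
    rw [List.getD_eq_getElem l 0 (by simpa using h1)]

theorem exists_other_index_iff (l : List Int) (i : Nat) (h : i < l.length) :
    (∃ j ∈ List.range l.length, l.getD i 0 = l.getD j 0 ∧ i ≠ j) ↔ l.count (l.getD i 0) ≠ 1 := by
  set v := l.getD i 0 with hv
  have hvi : l.getD i 0 = l[i] := List.getD_eq_getElem l 0 h
  have hmem : v ∈ l := by rw [hv, hvi]; exact List.getElem_mem h
  have hpos : 0 < l.count v := List.count_pos_iff.mpr hmem
  have hsplit := countP_split (fun j => l.getD j 0 == v) (fun j => !(j == i)) (List.range l.length)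
  have hone : (List.range l.length).countP (fun j => (l.getD j 0 == v) && !(!(j == i))) = 1 := by
    have hfun : (fun j => (l.getD j 0 == v) && !(!(j == i))) = (fun j => j == i) := by
      funext j
      by_cases hj : j = i <;> simp [hj, hv]
    rw [hfun]
    have : (List.range l.length).countP (fun j => j == i) = (List.range l.length).count i := rfl
    rw [this, List.count_eq_one_of_mem List.nodup_range (List.mem_range.mpr h)]
  have hcnt : (List.range l.length).countP (fun j => l.getD j 0 == v) = l.count v :=
    countP_range_getD l v
  have hkey : (List.range l.length).countP (fun j => (l.getD j 0 == v) && !(j == i))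
      = l.count v - 1 := by omega
  constructor
  · rintro ⟨j, hjr, hje, hjne⟩
    have : 0 < (List.range l.length).countP (fun j => (l.getD j 0 == v) && !(j == i)) := by
      rw [List.countP_pos_iff]
      refine ⟨j, hjr, ?_⟩
      have he1 : l.getD j 0 = v := hje.symm
      have he2 : j ≠ i := fun hji => hjne hji.symm
      simp only [Bool.and_eq_true, beq_iff_eq, Bool.not_eq_true', beq_eq_false_iff_ne]
      exact ⟨he1, he2⟩
    omega
  · intro hne
    have : 0 < (List.range l.length).countP (fun j => (l.getD j 0 == v) && !(j == i)) := by omega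
    rw [List.countP_pos_iff] at this
    obtain ⟨j, hjr, hp⟩ := this
    simp only [Bool.and_eq_true, beq_iff_eq, Bool.not_eq_true', beq_eq_false_iff_ne] at hp
    exact ⟨j, hjr, by rw [hv, hp.1], fun hij => hp.2 hij.symm⟩

theorem alta_lista_eq_map (l : List Int) :
    alta_lista l = l.map (fun x => if l.count x = 1 then numar_divizori x else x) := by
  unfold alta_lista
  rw [PySem.List.foldl_congr_mem (List.range l.length) _
    (fun lista2 i => lista2 ++ [if l.count (l.getD i 0) = 1 then numar_divizori (l.getD i 0) else l.getD i 0]) []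
    ?_]
  · rw [PySem.List.foldl_append_singleton_eq_map, List.nil_append]
    exact map_range_getD l (fun x => if l.count x = 1 then numar_divizori x else x)
  · intro lista2 i hi
    have hi' : i < l.length := List.mem_range.mp hi
    show (if ((List.range l.length).foldl (fun ok j =>
        if l.getD i 0 = l.getD j 0 ∧ i ≠ j then 0 else ok) 1) = 1
      then lista2 ++ [numar_divizori (l.getD i 0)] else lista2 ++ [l.getD i 0]) = _
    rw [foldl_flag (fun j => l.getD i 0 = l.getD j 0 ∧ i ≠ j) (List.range l.length) 1]
    by_cases hex : ∃ j ∈ List.range l.length, l.getD i 0 = l.getD j 0 ∧ i ≠ j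
    · have hc : ¬ l.count (l.getD i 0) = 1 := (exists_other_index_iff l i hi').mp hex
      rw [if_pos hex, if_neg (show ¬ (0 : Int) = 1 by norm_num)]
      show lista2 ++ [l.getD i 0]
        = lista2 ++ [if List.count (l.getD i 0) l = 1 then numar_divizori (l.getD i 0) else l.getD i 0]
      rw [if_neg hc]
    · have hc : l.count (l.getD i 0) = 1 := by
        by_contra hx
        exact hex ((exists_other_index_iff l i hi').mpr hx)
      rw [if_neg hex, if_pos (show (1 : Int) = 1 from rfl)]
      show lista2 ++ [numar_divizori (l.getD i 0)]
        = lista2 ++ [if List.count (l.getD i 0) l = 1 then numar_divizori (l.getD i 0) else l.getD i 0]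
      rw [if_pos hc]

theorem alta_lista_alt_eq_map (l : List Int) :
    alta_lista_alt l = l.map (fun x => if l.count x = 1 then numar_divizori_proprii_rapid x else x) := by
  unfold alta_lista_alt
  apply List.map_congr_left
  intro x _
  have h0 : (PySem.Dict.empty : PySem.Dict Int Int).getD x 0 = 0 := by simp [pysem]
  rw [PySem.Dict.getD_foldl_insert_add_one l PySem.Dict.empty x, h0]
  have : ((0 : Int) + (l.count x : Int) = 1) ↔ l.count x = 1 := by omega
  by_cases h : l.count x = 1
  · rw [if_pos (this.mpr h), if_pos h]
  · rw [if_neg (fun hx => h (this.mp hx)), if_neg h]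

-- ===== VERDICT (by name: the statement is the Claim_ definition above) =====
theorem alta_lista_spec : Claim_equal_alta_lista := by
  intro l _
  unfold Spec_alta_lista
  rw [alta_lista_eq_map, alta_lista_alt_eq_map]
  simp only [numar_divizori_agree]
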